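-- pv_equiv track=rewrite | github.com/matsoob/python-practice | mario/practice_1/solution.py | words_typable_from_this_number
-- ===== SOURCE A (Python) =====
-- from typing import List
--
-- REVERSE_MAPPING = {
--     'a': '2',
--     'b': '2',
--     'c': '2',
--     'd': '3',
--     'e': '3',
--     'f': '3',
--     'g': '4',
--     'h': '4',
--     'i': '4',
--     'j': '5',
--     'k': '5',
--     'l': '5',
--     'm': '6',
--     'n': '6',
--     'o': '6',
--     'p': '7',
--     'q': '7',
--     'r': '7',
--     's': '7',
--     't': '8',
--     'u': '8',
--     'v': '8',
--     'w': '9',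
--     'x': '9',
--     'y': '9',
--     'z': '9'
-- }
--
-- def words_typable_from_this_number(number: str, words: List[str]) -> List[str]:
--     # length of orginal number <= 15
--     # words list can grow long
--     # all words shorter than number
--     translated_number = [char for char in number if char != '1' and char != '0']
--
--     if not translated_number:
--         return []
--
--     matched_words = list()
--     for word in words:
--         translated_word = [REVERSE_MAPPING[char] for char in word]
--         if not word:
--             matched_words.append(word)
--         else:
--             word_pointer = 0
--             number_pointer = 0
--             while word_pointer < len(translated_word) and number_pointer < len(translated_number):
--                 if translated_word[word_pointer] == translated_number[number_pointer]:
--                     word_pointer += 1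
--                     number_pointer += 1
--                 else:
--                     number_pointer -= word_pointer
--                     word_pointer = 0
--                     number_pointer += 1
--             if word_pointer == len(translated_word):
--                 matched_words.append(word)
--     return matched_words
-- ===== SOURCE B (Python) =====
-- from typing import List
--
-- REVERSE_MAPPING = {
--     'a': '2', 'b': '2', 'c': '2',
--     'd': '3', 'e': '3', 'f': '3',
--     'g': '4', 'h': '4', 'i': '4',
--     'j': '5', 'k': '5', 'l': '5',
--     'm': '6', 'n': '6', 'o': '6',
--     'p': '7', 'q': '7', 'r': '7', 's': '7',
--     't': '8', 'u': '8', 'v': '8',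
--     'w': '9', 'x': '9', 'y': '9', 'z': '9'
-- }
--
-- def words_typable_from_this_number(number: str, words: List[str]) -> List[str]:
--     translated_number = ''.join(c for c in number if c not in '01')
--     if not translated_number:
--         return []
--     n = len(translated_number)
--     max_len = max(map(len, words), default=0)
--     substrings = set()
--     for i in range(n):
--         for j in range(i + 1, min(i + max_len, n) + 1):
--             substrings.add(translated_number[i:j])
--     substrings.add('')
--     return [w for w in words
--             if ''.join(REVERSE_MAPPING[c] for c in w) in substrings]
-- ===== Notes on version B (the rewrite author's own statement) =====
-- stated objective: faster
-- what changed: Replaced A's per-word backtracking two-pointer substring search (with a special empty-word branch) by precomputing once the set of all substrings of the translated number up to the maximum word length (plus the empty string) and testing each word's digit translation by a single set-membership lookup.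
import Mathlib
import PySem

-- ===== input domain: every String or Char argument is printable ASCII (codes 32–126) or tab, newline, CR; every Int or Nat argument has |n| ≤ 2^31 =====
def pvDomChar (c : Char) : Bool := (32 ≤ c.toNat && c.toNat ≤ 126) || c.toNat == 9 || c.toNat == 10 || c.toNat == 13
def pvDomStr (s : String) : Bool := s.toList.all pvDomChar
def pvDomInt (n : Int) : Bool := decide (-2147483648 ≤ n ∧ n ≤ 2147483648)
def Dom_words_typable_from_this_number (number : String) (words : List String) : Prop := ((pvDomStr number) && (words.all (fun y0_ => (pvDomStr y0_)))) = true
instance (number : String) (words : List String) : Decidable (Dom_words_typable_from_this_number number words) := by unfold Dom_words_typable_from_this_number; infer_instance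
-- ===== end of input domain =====

-- B replaces A's per-word backtracking two-pointer substring search by precomputing once the set
-- of all substrings of the translated number up to the maximum word length (plus '') and testing
-- each word's digit translation by one set-membership lookup (objective: faster; measured by the
-- timing run).

-- ===== PORT A =====
-- the module constant REVERSE_MAPPING, shared by both Pythons
def pvREVERSE_MAPPING : PySem.Dict Char Char :=
  PySem.Dict.ofList
  [('a','2'),('b','2'),('c','2'),('d','3'),('e','3'),('f','3'),('g','4'),('h','4'),('i','4'),
   ('j','5'),('k','5'),('l','5'),('m','6'),('n','6'),('o','6'),('p','7'),('q','7'),('r','7'),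
   ('s','7'),('t','8'),('u','8'),('v','8'),('w','9'),('x','9'),('y','9'),('z','9')]

-- REVERSE_MAPPING[char]; the KeyError case (no entry) is excluded by Pre_, so the total form is exact there
def pvLookup (c : Char) : Char := (PySem.Dict.get? pvREVERSE_MAPPING c).getD '?'

-- A's while loop, literally: two pointers, backtracking on mismatch; returns the final word_pointer.
-- The fuel argument is only a totality guard (the loop body is unchanged); pvLoopA below hands it
-- enough fuel for every input, as proved in pvLoopAGo_iff.
def pvLoopAGo (tw tn : List Char) : Nat → Nat → Nat → Nat
  | 0, wp, _ => wp
  | fuel + 1, wp, np =>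
    if h : wp < tw.length ∧ np < tn.length then
      if tw[wp]'h.1 = tn[np]'h.2 then pvLoopAGo tw tn fuel (wp + 1) (np + 1)
      else pvLoopAGo tw tn fuel 0 (np - wp + 1)
    else wp

def pvLoopA (tw tn : List Char) (wp np : Nat) : Nat :=
  pvLoopAGo tw tn ((tn.length + 1) * (tw.length + 1) + 1) wp np

def words_typable_from_this_number (number : String) (words : List String) : List String :=
  let translated_number := number.toList.filter (fun char => !(char == '1') && !(char == '0'))
  if translated_number = [] then []
  else
    words.foldl (fun matched_words word =>
      let translated_word := word.toList.map pvLookup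
      if word = "" then matched_words ++ [word]
      else if pvLoopA translated_word translated_number 0 0 = translated_word.length then
        matched_words ++ [word]
      else matched_words) []

-- ===== PORT B =====
-- max(map(len, words), default=0)
def pvMaxLen (words : List String) : Nat :=
  words.foldl (fun m w => max m w.toList.length) 0

-- the nested 'for i in range(n): for j in range(i+1, min(i+max_len, n)+1): substrings.add(tn[i:j])' loops
def pvBuildSubs (tn : List Char) (L : Nat) : PySem.Set (List Char) :=
  (PySem.List.pyRange 0 (tn.length : Int) 1).foldl (fun s i =>
    (PySem.List.pyRange (i + 1) (min (i + (L : Int)) (tn.length : Int) + 1) 1).foldl (fun s j =>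
      PySem.Set.add s (PySem.List.slice tn (some i) (some j))) s) PySem.Set.empty

def words_typable_from_this_number_alt (number : String) (words : List String) : List String :=
  let translated_number := number.toList.filter (fun c => !(c == '0' || c == '1'))
  if translated_number = [] then []
  else
    let substrings := PySem.Set.add (pvBuildSubs translated_number (pvMaxLen words)) []
    words.filter (fun w => PySem.Set.contains substrings (w.toList.map pvLookup))

-- ===== PRECONDITION & SPEC =====
-- Pre_ excludes exactly the KeyError inputs: when the number has a typable character (so the word loop
-- is reached), every character of every word must be a lowercase letter 'a'..'z' (a key of REVERSE_MAPPING).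
def Pre_words_typable_from_this_number (number : String) (words : List String) : Prop :=
  number.toList.any (fun c => !(c == '0' || c == '1')) = true →
    words.all (fun w => w.toList.all (fun c => 'a' ≤ c && c ≤ 'z')) = true
instance (number : String) (words : List String) : Decidable (Pre_words_typable_from_this_number number words) := by
  unfold Pre_words_typable_from_this_number; infer_instance

def pvWitness_words_typable_from_this_number : String × List String := ("23", ["ad", "", "b"])

def Spec_words_typable_from_this_number (number : String) (words : List String) (out : List String) : Prop := out = words_typable_from_this_number_alt number words
instance (number : String) (words : List String) (out : List String) : Decidable (Spec_words_typable_from_this_number number words out) := by unfold Spec_words_typable_from_this_number; infer_instance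

-- ===== CLAIM (what is proved, stated in full; the proofs are below) =====
def Claim_equal_words_typable_from_this_number : Prop := ∀ (number : String) (words : List String), Dom_words_typable_from_this_number number words → Pre_words_typable_from_this_number number words → Spec_words_typable_from_this_number number words (words_typable_from_this_number number words)

-- ===== LEMMAS AND PROOFS =====

-- the two filter predicates ("c != '1' and c != '0'" vs "c not in '01'") agree
theorem pvPredEq : (fun char => !(char == '1') && !(char == '0')) = (fun c : Char => !(c == '0' || c == '1')) := by
  funext c
  cases h0 : (c == '0') <;> cases h1 : (c == '1') <;> simp_all

-- A's backtracking loop finds a full match iff tw is a prefix of some suffix of tn starting at or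
-- after np - wp, given the invariant that the first wp characters already match at position np - wp
-- and enough fuel for the remaining iterations.
theorem pvLoopAGo_iff (tw tn : List Char) (fuel : Nat) : ∀ (wp np : Nat),
    wp ≤ np → np ≤ tn.length → wp ≤ tw.length →
    tw.take wp = (tn.drop (np - wp)).take wp →
    (tn.length - (np - wp)) * (tw.length + 1) + (tw.length - wp) + 1 ≤ fuel →
    ((pvLoopAGo tw tn fuel wp np = tw.length) ↔ ∃ s, np - wp ≤ s ∧ tw <+: tn.drop s) := by
  induction fuel with
  | zero => intro wp np _ _ _ _ hf; omega
  | succ fuel ih =>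
    intro wp np h1 h2 h3 h4 hf
    by_cases h : wp < tw.length ∧ np < tn.length
    · by_cases heq : tw[wp]'h.1 = tn[np]'h.2
      · -- match: both pointers advance, np - wp is unchanged
        rw [show pvLoopAGo tw tn (fuel + 1) wp np = pvLoopAGo tw tn fuel (wp + 1) (np + 1) by
          simp only [pvLoopAGo]; rw [dif_pos h, if_pos heq]]
        have e : np + 1 - (wp + 1) = np - wp := by omega
        have h4' : tw.take (wp + 1) = (tn.drop (np - wp)).take (wp + 1) := by
          rw [List.take_add_one, List.take_add_one, h4]
          congr 1
          rw [List.getElem?_drop]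
          have e2 : np - wp + wp = np := by omega
          rw [e2, List.getElem?_eq_getElem h.1, List.getElem?_eq_getElem h.2, heq]
        rw [ih (wp + 1) (np + 1) (by omega) (by omega) (by omega) (by rw [e]; exact h4')
              (by rw [e]; omega), e]
      · -- mismatch: restart one position further right
        rw [show pvLoopAGo tw tn (fuel + 1) wp np = pvLoopAGo tw tn fuel 0 (np - wp + 1) by
          simp only [pvLoopAGo]; rw [dif_pos h, if_neg heq]]
        have hA : (tn.length - (np - wp + 1)) * (tw.length + 1) + (tw.length + 1)
            = (tn.length - (np - wp)) * (tw.length + 1) := by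
          have e3 : tn.length - (np - wp + 1) + 1 = tn.length - (np - wp) := by omega
          calc (tn.length - (np - wp + 1)) * (tw.length + 1) + (tw.length + 1)
              = (tn.length - (np - wp + 1) + 1) * (tw.length + 1) := by ring
            _ = (tn.length - (np - wp)) * (tw.length + 1) := by rw [e3]
        rw [ih 0 (np - wp + 1) (by omega) (by omega) (by omega) (by simp) (by simp only [Nat.sub_zero]; omega)]
        have hnot : ¬ tw <+: tn.drop (np - wp) := by
          intro hp
          have hw : wp < (tn.drop (np - wp)).length := by
            rw [List.length_drop]; omega
          have hg := hp.getElem h.1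
          rw [List.getElem_drop] at hg
          have e2 : np - wp + wp = np := by omega
          simp only [e2] at hg
          exact heq hg
        simp only [Nat.sub_zero]
        constructor
        · rintro ⟨s, hs, hp⟩
          exact ⟨s, by omega, hp⟩
        · rintro ⟨s, hs, hp⟩
          have hne' : s ≠ np - wp := fun he => hnot (he ▸ hp)
          exact ⟨s, by omega, hp⟩
    · -- loop exit
      rw [show pvLoopAGo tw tn (fuel + 1) wp np = wp by
        simp only [pvLoopAGo]; rw [dif_neg h]]
      constructor
      · intro hw
        refine ⟨np - wp, le_rfl, ?_⟩
        rw [List.prefix_iff_eq_take, ← hw]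
        calc tw = tw.take wp := by rw [hw, List.take_length]
          _ = (tn.drop (np - wp)).take wp := h4
      · rintro ⟨s, hs, hp⟩
        by_contra hc
        have hlen := hp.length_le
        rw [List.length_drop] at hlen
        have hnp : ¬ np < tn.length := fun hnp => h ⟨by omega, hnp⟩
        omega

-- at (0,0) the loop succeeds iff tw is a prefix of some suffix of tn
theorem pvLoopA_iff (tw tn : List Char) :
    (pvLoopA tw tn 0 0 = tw.length) ↔ ∃ s, tw <+: tn.drop s := by
  unfold pvLoopA
  have hmul : (tn.length + 1) * (tw.length + 1)
      = tn.length * (tw.length + 1) + (tw.length + 1) := by ring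
  rw [pvLoopAGo_iff tw tn _ 0 0 (by omega) (by omega) (by omega) (by simp) (by simp only [Nat.sub_zero]; omega)]
  simp

-- membership through the doubly nested add-fold
theorem pvMemFoldl2 {β : Type} [BEq β] [LawfulBEq β] (l : List Int) (g : Int → List Int)
    (f : Int → Int → β) (s0 : PySem.Set β) (y : β) :
    y ∈ l.foldl (fun s i => (g i).foldl (fun s j => PySem.Set.add s (f i j)) s) s0 ↔
      y ∈ s0 ∨ ∃ i ∈ l, ∃ j ∈ g i, y = f i j := by
  induction l generalizing s0 with
  | nil => simp
  | cons a l ih =>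
    simp only [List.foldl_cons, ih, PySem.Set.mem_foldl_add, List.mem_cons]
    constructor
    · rintro (⟨hy | ⟨j, hj, hy⟩⟩ | ⟨i, hi, j, hj, hy⟩)
      · exact Or.inl hy
      · exact Or.inr ⟨a, Or.inl rfl, j, hj, hy⟩
      · exact Or.inr ⟨i, Or.inr hi, j, hj, hy⟩
    · rintro (hy | ⟨i, (rfl | hi), j, hj, hy⟩)
      · exact Or.inl (Or.inl hy)
      · exact Or.inl (Or.inr ⟨j, hj, hy⟩)
      · exact Or.inr ⟨i, hi, j, hj, hy⟩

-- foldl max never drops below its initial accumulator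
theorem pvFoldlMaxInit (words : List String) : ∀ (init : Nat),
    init ≤ words.foldl (fun m w => max m w.toList.length) init := by
  induction words with
  | nil => intro init; simp
  | cons a l ih => intro init; exact le_trans (le_max_left _ _) (ih _)

-- every word in the list is no longer than pvMaxLen
theorem pvLenLeMaxAux (w : String) (words : List String) (hw : w ∈ words) :
    ∀ (init : Nat), w.toList.length ≤ words.foldl (fun m w => max m w.toList.length) init := by
  induction words with
  | nil => cases hw
  | cons a l ih =>
    intro init
    simp only [List.foldl_cons]
    rcases List.mem_cons.mp hw with h | hw'
    · subst h
      exact le_trans (le_max_right init _) (pvFoldlMaxInit l _)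
    · exact ih hw' _

theorem pvLenLeMax (words : List String) (w : String) (hw : w ∈ words) :
    w.toList.length ≤ pvMaxLen words := pvLenLeMaxAux w words hw 0

-- the built set (with '' added) contains tw iff tw is a prefix of some suffix of tn,
-- for any tw no longer than the length bound L
theorem pvMemSubs (tn tw : List Char) (L : Nat) (hL : tw.length ≤ L) :
    tw ∈ PySem.Set.add (pvBuildSubs tn L) [] ↔ ∃ s, tw <+: tn.drop s := by
  rw [PySem.Set.mem_add]
  unfold pvBuildSubs
  rw [pvMemFoldl2]
  simp only [PySem.Set.empty, List.not_mem_nil, false_or]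
  constructor
  · rintro (⟨i, hi, j, hj, rfl⟩ | rfl)
    · rw [PySem.List.mem_pyRange_one] at hi hj
      obtain ⟨hi0, hin⟩ := hi
      obtain ⟨hji, hjn⟩ := hj
      refine ⟨i.toNat, ?_⟩
      rw [PySem.List.slice_of_nonneg tn hi0 (by omega) (by omega) (by omega)]
      exact List.take_prefix _ _
    · exact ⟨0, List.nil_prefix⟩
  · rintro ⟨s, hp⟩
    by_cases hw : tw = []
    · exact Or.inr hw
    · left
      have hlen := hp.length_le
      rw [List.length_drop] at hlen
      have htw : 0 < tw.length := List.length_pos_iff.mpr hw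
      have hs : s < tn.length := by omega
      refine ⟨(s : Int), ?_, (s : Int) + (tw.length : Int), ?_, ?_⟩
      · rw [PySem.List.mem_pyRange_one]; constructor <;> [positivity; exact_mod_cast hs]
      · rw [PySem.List.mem_pyRange_one]
        constructor
        · omega
        · omega
      · rw [PySem.List.slice_natCast_add]
        rw [List.prefix_iff_eq_take] at hp
        exact hp

-- A's append-fold over the words equals B's filter
theorem pvFoldlEq (tn : List Char) (words : List String) :
    words.foldl (fun matched_words word =>
      let translated_word := word.toList.map pvLookup
      if word = "" then matched_words ++ [word]
      else if pvLoopA translated_word tn 0 0 = translated_word.length then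
        matched_words ++ [word]
      else matched_words) []
    = words.filter (fun w => PySem.Set.contains (PySem.Set.add (pvBuildSubs tn (pvMaxLen words)) []) (w.toList.map pvLookup)) := by
  have hiff : ∀ w : String, w ∈ words → ((PySem.Set.contains (PySem.Set.add (pvBuildSubs tn (pvMaxLen words)) []) (w.toList.map pvLookup) = true)
      ↔ (w = "" ∨ pvLoopA (w.toList.map pvLookup) tn 0 0 = (w.toList.map pvLookup).length)) := by
    intro w hw
    rw [PySem.Set.contains_iff,
        pvMemSubs tn _ (pvMaxLen words) (by simpa using pvLenLeMax words w hw), ← pvLoopA_iff]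
    constructor
    · intro h; exact Or.inr h
    · rintro (rfl | h)
      · rw [pvLoopA_iff]; exact ⟨0, by simp⟩
      · exact h
  have hb : (fun (matched_words : List String) word =>
      let translated_word := word.toList.map pvLookup
      if word = "" then matched_words ++ [word]
      else if pvLoopA translated_word tn 0 0 = translated_word.length then
        matched_words ++ [word]
      else matched_words)
      = (fun matched_words w =>
        if (w = "" ∨ pvLoopA (w.toList.map pvLookup) tn 0 0 = (w.toList.map pvLookup).length)
        then matched_words ++ [w] else matched_words) := by
    funext acc w
    by_cases hw : w = ""
    · simp [hw]
    · simp only [hw, if_false, false_or]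
  rw [hb, PySem.List.foldl_append_ite_eq_filter]
  rw [List.nil_append]
  refine List.filter_congr ?_
  intro w hw
  have hwi := hiff w hw
  by_cases hp : (w = "" ∨ pvLoopA (w.toList.map pvLookup) tn 0 0 = (w.toList.map pvLookup).length)
  · rw [hwi.mpr hp]
    simpa using hp
  · have hc : PySem.Set.contains (PySem.Set.add (pvBuildSubs tn (pvMaxLen words)) []) (w.toList.map pvLookup) = false := by
      cases h' : PySem.Set.contains (PySem.Set.add (pvBuildSubs tn (pvMaxLen words)) []) (w.toList.map pvLookup)
      · rfl
      · exact absurd (hwi.mp h') hp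
    rw [hc]
    simpa using hp

-- ===== VERDICT (by name: the statement is the Claim_ definition above) =====
theorem words_typable_from_this_number_spec : Claim_equal_words_typable_from_this_number := by
  intro number words _dom _pre
  unfold Spec_words_typable_from_this_number
  unfold words_typable_from_this_number words_typable_from_this_number_alt
  rw [pvPredEq]
  by_cases hE : number.toList.filter (fun c => !(c == '0' || c == '1')) = []
  · rw [if_pos hE, if_pos hE]
  · rw [if_neg hE, if_neg hE]
    exact pvFoldlEq _ words
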